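-- pv_equiv track=rewrite | github.com/liuchia/pykattis | templates/py/EdmondsKarp.py | shortestAugmentingPath
-- ===== SOURCE A (Python) =====
-- from collections import deque
--
-- def shortestAugmentingPath(C, A, F, s, t):
-- 	n, queue = len(C), deque([s])
-- 	P, M = [-1 for i in range(n)], [0 for i in range(n)]
-- 	P[s], M[s] = -2, 10**10
-- 	while queue:
-- 		u = queue.popleft()
-- 		for v in A[u]:
-- 			if C[u][v] - F[u][v] > 0 and P[v] == -1:
-- 				P[v], M[v] = u, min(M[u], C[u][v] - F[u][v])
-- 				if v != t:
-- 					queue.append(v)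
-- 				else:
-- 					return M[t], P
-- 	return 0, P
-- ===== SOURCE B (Python) =====
-- def shortestAugmentingPath(C, A, F, s, t):
--     n = len(C)
--     P = [-1] * n
--     P[s] = -2
--     q = [s]
--     i = 0
--     found = False
--     while i < len(q) and not found:
--         u = q[i]
--         i += 1
--         for v in A[u]:
--             if C[u][v] - F[u][v] > 0 and P[v] == -1:
--                 P[v] = u
--                 if v == t:
--                     found = True
--                     break
--                 q.append(v)
--     if not found:
--         return 0, P
--     M = 10 ** 10
--     v = t
--     while P[v] != -2:
--         M = min(M, C[P[v]][v] - F[P[v]][v])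
--         v = P[v]
--     return M, P
-- ===== Notes on version B (the rewrite author's own statement) =====
-- stated objective: alternative
-- what changed: B drops A's per-node bottleneck array M entirely: its BFS maintains only the parent array P (scanning a plain list with a cursor index instead of a deque) and, once the sink is reached, recomputes the bottleneck in a single backward walk along the parent chain.
import Mathlib
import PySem

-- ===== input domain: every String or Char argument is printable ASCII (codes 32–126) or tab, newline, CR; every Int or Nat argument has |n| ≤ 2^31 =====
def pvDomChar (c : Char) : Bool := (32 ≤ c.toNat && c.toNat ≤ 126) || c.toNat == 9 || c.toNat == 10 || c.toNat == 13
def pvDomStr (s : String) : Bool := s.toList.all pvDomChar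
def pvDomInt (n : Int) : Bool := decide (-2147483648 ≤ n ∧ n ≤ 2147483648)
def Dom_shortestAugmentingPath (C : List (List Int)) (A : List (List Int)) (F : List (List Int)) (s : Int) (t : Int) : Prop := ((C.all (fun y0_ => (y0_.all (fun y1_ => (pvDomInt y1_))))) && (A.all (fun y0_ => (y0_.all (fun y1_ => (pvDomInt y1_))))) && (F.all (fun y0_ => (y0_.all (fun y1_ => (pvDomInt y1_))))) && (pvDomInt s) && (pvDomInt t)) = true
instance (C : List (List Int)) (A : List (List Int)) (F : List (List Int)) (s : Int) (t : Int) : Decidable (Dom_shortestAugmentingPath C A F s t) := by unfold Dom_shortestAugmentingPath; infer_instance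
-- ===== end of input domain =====

-- B drops A's per-node bottleneck array M: it runs the BFS keeping only the parent array
-- (with a cursor-indexed list instead of a deque) and recomputes the bottleneck by one
-- backward walk along the parent chain after the sink is reached (objective: alternative).

-- X[u][v] for in-range indices (Python list indexing; total form, used under Pre_)
def pvCell (X : List (List Int)) (u v : Int) : Int :=
  PySem.List.pyGetD (PySem.List.pyGetD X u []) v 0

-- ===== PORT A =====
-- inner 'for v in A[u]' loop of A; Sum.inl = the 'return M[t], P' early exit
def spInnerA (C F : List (List Int)) (t u : Int) :
    List Int → List Int → List Int → List Int → (Int × List Int) ⊕ (List Int × List Int × List Int)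
  | [], q, P, M => Sum.inr (q, P, M)
  | v :: vs, q, P, M =>
    if pvCell C u v - pvCell F u v > 0 ∧ PySem.List.pyGetD P v 0 = -1 then
      let P' := PySem.List.pySetD P v u
      let M' := PySem.List.pySetD M v (min (PySem.List.pyGetD M u 0) (pvCell C u v - pvCell F u v))
      if v ≠ t then spInnerA C F t u vs (q ++ [v]) P' M'
      else Sum.inl (PySem.List.pyGetD M' t 0, P')
    else spInnerA C F t u vs q P M

-- outer 'while queue' loop of A; the deque is a list popped at the head.
-- fuel: each BFS iteration pops a node enqueued at most once, so `n` pops suffice.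
def spLoopA (C A F : List (List Int)) (t : Int) :
    Nat → List Int → List Int → List Int → Int × List Int
  | 0, _, P, _ => (0, P)
  | _ + 1, [], P, _ => (0, P)
  | f + 1, u :: qs, P, M =>
    match spInnerA C F t u (PySem.List.pyGetD A u []) qs P M with
    | Sum.inl r => r
    | Sum.inr (q', P', M') => spLoopA C A F t f q' P' M'

def shortestAugmentingPath (C : List (List Int)) (A : List (List Int)) (F : List (List Int)) (s : Int) (t : Int) : Int × List Int :=
  let n := C.length
  let P := PySem.List.pySetD (List.replicate n (-1 : Int)) s (-2)
  let M := PySem.List.pySetD (List.replicate n (0 : Int)) s 10000000000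
  spLoopA C A F t n [s] P M

-- ===== PORT B =====
-- inner loop of B: only P is maintained; Sum.inl P' = 'found = True; break'
def spInnerB (C F : List (List Int)) (t u : Int) :
    List Int → List Int → List Int → (List Int) ⊕ (List Int × List Int)
  | [], q, P => Sum.inr (q, P)
  | v :: vs, q, P =>
    if pvCell C u v - pvCell F u v > 0 ∧ PySem.List.pyGetD P v 0 = -1 then
      let P' := PySem.List.pySetD P v u
      if v = t then Sum.inl P'
      else spInnerB C F t u vs (q ++ [v]) P'
    else spInnerB C F t u vs q P

-- outer 'while i < len(q) and not found' loop of B: list + cursor i, no deque.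
-- fuel as in spLoopA: at most n outer iterations can happen.
def spLoopB (C A F : List (List Int)) (t : Int) :
    Nat → List Int → Int → List Int → Bool × List Int
  | 0, _, _, P => (false, P)
  | f + 1, q, i, P =>
    if i < (q.length : Int) then
      match spInnerB C F t (PySem.List.pyGetD q i 0) (PySem.List.pyGetD A (PySem.List.pyGetD q i 0) []) q P with
      | Sum.inl P' => (true, P')
      | Sum.inr (q', P') => spLoopB C A F t f q' (i + 1) P'
    else (false, P)

-- B's backward bottleneck walk 'while P[v] != -2'; fuel: the parent chain built by the
-- BFS is acyclic, so `len(P)` steps suffice.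
def pvWalk (C F : List (List Int)) (P : List Int) : Nat → Int → Int → Int
  | 0, _, acc => acc
  | f + 1, v, acc =>
    if PySem.List.pyGetD P v 0 = -2 then acc
    else pvWalk C F P f (PySem.List.pyGetD P v 0)
      (min acc (pvCell C (PySem.List.pyGetD P v 0) v - pvCell F (PySem.List.pyGetD P v 0) v))

def shortestAugmentingPath_alt (C : List (List Int)) (A : List (List Int)) (F : List (List Int)) (s : Int) (t : Int) : Int × List Int :=
  let n := C.length
  let P0 := PySem.List.pySetD (List.replicate n (-1 : Int)) s (-2)
  match spLoopB C A F t n [s] 0 P0 with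
  | (false, P) => ((0 : Int), P)
  | (true, P) => (pvWalk C F P P.length t 10000000000, P)

-- ===== PRECONDITION & SPEC =====
-- Pre_ admits (i) the shape EdmondsKarp always calls this with — square capacity/flow
-- matrices, adjacency entries in [0, n), source 0 ≤ s < n — and (ii) degenerate inputs
-- whose BFS provably ends while scanning the source row A[s] without ever writing P or
-- visiting another node (every read of that scan in range, Python wraparound allowed, and
-- every positive-residual neighbour is s itself modulo wraparound). It excludes inputs on
-- which A raises IndexError, and with them some returning inputs it cannot classify in
-- closed form: deeper ragged/wrapped traversals whose safety depends on the BFS path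
-- (see claim cites).
def Pre_shortestAugmentingPath (C : List (List Int)) (A : List (List Int)) (F : List (List Int)) (s : Int) (t : Int) : Prop :=
  (0 ≤ s ∧ s < (C.length : Int) ∧ A.length = C.length ∧ F.length = C.length ∧
   (∀ row ∈ C, row.length = C.length) ∧ (∀ row ∈ F, row.length = C.length) ∧
   (∀ row ∈ A, ∀ v ∈ row, 0 ≤ v ∧ v < (C.length : Int)))
  ∨
  (-(C.length : Int) ≤ s ∧ s < (C.length : Int) ∧ -(A.length : Int) ≤ s ∧ s < (A.length : Int) ∧
   ∀ v ∈ PySem.List.pyGetD A s [],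
     (-(((PySem.List.pyGetD C s []).length : Int)) ≤ v ∧ v < ((PySem.List.pyGetD C s []).length : Int)) ∧
     (-(F.length : Int) ≤ s ∧ s < (F.length : Int)) ∧
     (-(((PySem.List.pyGetD F s []).length : Int)) ≤ v ∧ v < ((PySem.List.pyGetD F s []).length : Int)) ∧
     (PySem.List.pyGetD (PySem.List.pyGetD C s []) v 0 - PySem.List.pyGetD (PySem.List.pyGetD F s []) v 0 > 0 →
       -(C.length : Int) ≤ v ∧ v < (C.length : Int) ∧
       (v = s ∨ v = s + (C.length : Int) ∨ v = s - (C.length : Int))))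
instance (C : List (List Int)) (A : List (List Int)) (F : List (List Int)) (s : Int) (t : Int) : Decidable (Pre_shortestAugmentingPath C A F s t) := by unfold Pre_shortestAugmentingPath; infer_instance

def pvWitness_shortestAugmentingPath : List (List Int) × List (List Int) × List (List Int) × Int × Int :=
  ([[0, 1], [0, 0]], [[1], []], [[0, 0], [0, 0]], 0, 1)

def Spec_shortestAugmentingPath (C : List (List Int)) (A : List (List Int)) (F : List (List Int)) (s : Int) (t : Int) (out : Int × List Int) : Prop := out = shortestAugmentingPath_alt C A F s t
instance (C : List (List Int)) (A : List (List Int)) (F : List (List Int)) (s : Int) (t : Int) (out : Int × List Int) : Decidable (Spec_shortestAugmentingPath C A F s t out) := by unfold Spec_shortestAugmentingPath; infer_instance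

-- ===== CLAIM (what is proved, stated in full; the proofs are below) =====
def Claim_equal_shortestAugmentingPath : Prop := ∀ (C : List (List Int)) (A : List (List Int)) (F : List (List Int)) (s : Int) (t : Int), Dom_shortestAugmentingPath C A F s t → Pre_shortestAugmentingPath C A F s t → Spec_shortestAugmentingPath C A F s t (shortestAugmentingPath C A F s t)

-- ===== LEMMAS AND PROOFS =====

-- number of already-visited nodes (P-entries ≠ -1); bounds the parent-chain length
def pvSetCount (P : List Int) : Nat := P.countP (fun x => x != -1)

-- the parent chain from v reaches the -2 root in exactly k steps through in-range nodes
inductive pvChain (n : Int) (P : List Int) : Int → Nat → Prop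
  | base (v : Int) : PySem.List.pyGetD P v 0 = -2 → pvChain n P v 0
  | step (v : Int) (k : Nat) : 0 ≤ PySem.List.pyGetD P v 0 → PySem.List.pyGetD P v 0 < n →
      pvChain n P (PySem.List.pyGetD P v 0) k → pvChain n P v (k + 1)

-- loop invariant tying A's M array to B's backward walk
def pvInv (C F : List (List Int)) (P M : List Int) : Prop :=
  P.length = C.length ∧ M.length = C.length ∧
  ∀ v : Int, 0 ≤ v → v < (C.length : Int) → PySem.List.pyGetD P v 0 ≠ -1 →
    ∃ k : Nat, k < pvSetCount P ∧ pvChain (C.length : Int) P v k ∧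
      PySem.List.pyGetD M v 0 ≤ 10000000000 ∧
      ∀ (f : Nat) (acc : Int), k < f → acc ≤ 10000000000 →
        pvWalk C F P f v acc = min acc (PySem.List.pyGetD M v 0)

lemma pv_getD_set_self (xs : List Int) {i : Int} (x : Int)
    (h0 : 0 ≤ i) (h1 : i < (xs.length : Int)) :
    PySem.List.pyGetD (PySem.List.pySetD xs i x) i 0 = x := by
  rw [PySem.List.pySetD_of_nonneg xs x h0,
    PySem.List.pyGetD_eq_getElem _ 0 h0 (by rw [List.length_set]; exact h1)]
  simp

lemma pv_getD_set_ne (xs : List Int) {i j : Int} (x : Int)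
    (h0 : 0 ≤ i) (_h1 : i < (xs.length : Int)) (hj : 0 ≤ j) (hne : j ≠ i) :
    PySem.List.pyGetD (PySem.List.pySetD xs i x) j 0 = PySem.List.pyGetD xs j 0 := by
  rw [PySem.List.pySetD_of_nonneg xs x h0]
  by_cases hlt : j < (xs.length : Int)
  · have h2 : j < (((xs.set i.toNat x).length : Nat) : Int) := by rw [List.length_set]; exact hlt
    rw [PySem.List.pyGetD_eq_getElem _ 0 hj h2, PySem.List.pyGetD_eq_getElem xs 0 hj hlt]
    exact List.getElem_set_ne (by omega) _
  · have hj' : j = ((j.toNat : Nat) : Int) := by omega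
    rw [hj', PySem.List.pyGetD_natCast, PySem.List.pyGetD_natCast,
      List.getD_eq_default _ _ (by rw [List.length_set]; omega),
      List.getD_eq_default _ _ (by omega)]

lemma pv_setCount_le (P : List Int) : pvSetCount P ≤ P.length :=
  List.countP_le_length

lemma pv_setCount_pos (P : List Int) {v : Int} (h0 : 0 ≤ v) (h1 : v < (P.length : Int))
    (h : PySem.List.pyGetD P v 0 ≠ -1) : 0 < pvSetCount P := by
  rw [PySem.List.pyGetD_eq_getElem P 0 h0 h1] at h
  exact List.countP_pos_iff.mpr ⟨P[v.toNat], List.getElem_mem _, by simpa using h⟩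

lemma pv_setCount_set (P : List Int) {v : Int} (h0 : 0 ≤ v) (h1 : v < (P.length : Int))
    (hv : PySem.List.pyGetD P v 0 = -1) (x : Int) (hx : x ≠ -1) :
    pvSetCount (PySem.List.pySetD P v x) = pvSetCount P + 1 := by
  rw [PySem.List.pyGetD_eq_getElem P 0 h0 h1] at hv
  rw [pvSetCount, PySem.List.pySetD_of_nonneg P x h0,
    List.countP_set (by omega)]
  simp [pvSetCount, hv, hx]

lemma pv_chain_set {n : Int} {P : List Int} (hPl : (P.length : Int) = n)
    {w : Int} (x : Int) (hw0 : 0 ≤ w) (hw1 : w < n) (hw : PySem.List.pyGetD P w 0 = -1) :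
    ∀ v k, pvChain n P v k → 0 ≤ v → v < n → pvChain n (PySem.List.pySetD P w x) v k := by
  intro v k h
  induction h with
  | base v hv =>
    intro hv0 hv1
    exact pvChain.base v (by
      rw [pv_getD_set_ne P x hw0 (by omega) hv0 (by intro e; rw [e, hw] at hv; omega)]
      exact hv)
  | step v k hp0 hp1 hc ih =>
    intro hv0 hv1
    have hne : v ≠ w := by intro e; rw [e, hw] at hp0; omega
    have hr : PySem.List.pyGetD (PySem.List.pySetD P w x) v 0 = PySem.List.pyGetD P v 0 :=
      pv_getD_set_ne P x hw0 (by omega) hv0 hne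
    exact pvChain.step v k (by rw [hr]; exact hp0) (by rw [hr]; exact hp1)
      (by rw [hr]; exact ih hp0 hp1)

lemma pv_walk_set (C F : List (List Int)) {n : Int} {P : List Int} (hPl : (P.length : Int) = n)
    {w : Int} (x : Int) (hw0 : 0 ≤ w) (hw1 : w < n) (hw : PySem.List.pyGetD P w 0 = -1) :
    ∀ v k, pvChain n P v k → 0 ≤ v → v < n → ∀ (f : Nat) (acc : Int),
      pvWalk C F (PySem.List.pySetD P w x) f v acc = pvWalk C F P f v acc := by
  intro v k h
  induction h with
  | base v hv =>
    intro hv0 hv1 f acc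
    cases f with
    | zero => rfl
    | succ f =>
      have hr : PySem.List.pyGetD (PySem.List.pySetD P w x) v 0 = PySem.List.pyGetD P v 0 :=
        pv_getD_set_ne P x hw0 (by omega) hv0 (by intro e; rw [e, hw] at hv; omega)
      simp only [pvWalk, hr, hv, if_pos]
  | step v k hp0 hp1 hc ih =>
    intro hv0 hv1 f acc
    cases f with
    | zero => rfl
    | succ f =>
      have hne : v ≠ w := by intro e; rw [e, hw] at hp0; omega
      have hr : PySem.List.pyGetD (PySem.List.pySetD P w x) v 0 = PySem.List.pyGetD P v 0 :=
        pv_getD_set_ne P x hw0 (by omega) hv0 hne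
      simp only [pvWalk, hr]
      rw [if_neg (by omega), if_neg (by omega)]
      exact ih hp0 hp1 f _

lemma pv_good_set (P : List Int) {v w : Int} (x : Int)
    (hv0 : 0 ≤ v) (hv1 : v < (P.length : Int)) (hx : x ≠ -1)
    (hw0 : 0 ≤ w) (hw : PySem.List.pyGetD P w 0 ≠ -1) :
    PySem.List.pyGetD (PySem.List.pySetD P v x) w 0 ≠ -1 := by
  by_cases hwv : w = v
  · rw [hwv, pv_getD_set_self P x hv0 hv1]; exact hx
  · rw [pv_getD_set_ne P x hv0 hv1 hw0 hwv]; exact hw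

-- the heart of the equivalence: setting P[v] := u and M[v] := min(M[u], res(u,v)) for an
-- unvisited v preserves the invariant (B's backward walk from v computes A's M[v])
set_option maxHeartbeats 800000 in
lemma pv_inv_update (C F : List (List Int)) (P M : List Int) {u v : Int}
    (hInv : pvInv C F P M)
    (hu0 : 0 ≤ u) (hu1 : u < (C.length : Int)) (hu : PySem.List.pyGetD P u 0 ≠ -1)
    (hv0 : 0 ≤ v) (hv1 : v < (C.length : Int)) (hv : PySem.List.pyGetD P v 0 = -1) :
    pvInv C F (PySem.List.pySetD P v u)
      (PySem.List.pySetD M v (min (PySem.List.pyGetD M u 0) (pvCell C u v - pvCell F u v))) := by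
  obtain ⟨hPl, hMl, hmain⟩ := hInv
  have hPlc : ((P.length : Nat) : Int) = ((C.length : Nat) : Int) := by exact_mod_cast hPl
  have hPl' : v < (P.length : Int) := by omega
  have hMl' : v < (M.length : Int) := by omega
  have hcount : pvSetCount (PySem.List.pySetD P v u) = pvSetCount P + 1 :=
    pv_setCount_set P hv0 hPl' hv u (by omega)
  refine ⟨by rw [PySem.List.length_pySetD]; exact hPl, by rw [PySem.List.length_pySetD]; exact hMl, ?_⟩
  intro w hw0 hw1 hw
  by_cases hwv : w = v
  · obtain ⟨k, hk, hch, hMle, hwalk⟩ := hmain u hu0 hu1 hu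
    have hPv : PySem.List.pyGetD (PySem.List.pySetD P v u) w 0 = u := by
      rw [hwv]; exact pv_getD_set_self P u hv0 hPl'
    have hMv : PySem.List.pyGetD (PySem.List.pySetD M v (min (PySem.List.pyGetD M u 0) (pvCell C u v - pvCell F u v))) w 0
        = min (PySem.List.pyGetD M u 0) (pvCell C u v - pvCell F u v) := by
      rw [hwv]; exact pv_getD_set_self M _ hv0 hMl'
    refine ⟨k + 1, by omega, ?_, by rw [hMv]; omega, ?_⟩
    · exact pvChain.step w k (by rw [hPv]; exact hu0) (by rw [hPv]; exact hu1)
        (by rw [hPv]; exact pv_chain_set hPlc u hv0 hv1 hv u k hch hu0 hu1)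
    · intro f acc hf hacc
      cases f with
      | zero => omega
      | succ f =>
        simp only [pvWalk, hPv]
        rw [if_neg (by omega)]
        rw [hwv]
        rw [pv_walk_set C F hPlc u hv0 hv1 hv u k hch hu0 hu1 f _]
        rw [hwalk f _ (by omega) (by omega)]
        rw [pv_getD_set_self M _ hv0 hMl']
        omega
  · have hPw : PySem.List.pyGetD (PySem.List.pySetD P v u) w 0 = PySem.List.pyGetD P w 0 :=
      pv_getD_set_ne P u hv0 hPl' hw0 hwv
    have hMw : PySem.List.pyGetD (PySem.List.pySetD M v (min (PySem.List.pyGetD M u 0) (pvCell C u v - pvCell F u v))) w 0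
        = PySem.List.pyGetD M w 0 :=
      pv_getD_set_ne M _ hv0 hMl' hw0 hwv
    rw [hPw] at hw
    obtain ⟨k, hk, hch, hMle, hwalk⟩ := hmain w hw0 hw1 hw
    refine ⟨k, by omega, pv_chain_set hPlc u hv0 hv1 hv w k hch hw0 hw1, by rw [hMw]; exact hMle, ?_⟩
    intro f acc hf hacc
    rw [pv_walk_set C F hPlc u hv0 hv1 hv w k hch hw0 hw1 f acc, hMw]
    exact hwalk f acc hf hacc

set_option maxHeartbeats 800000 in
lemma pv_inner_main (C F : List (List Int)) (t u : Int)
    (hu0 : 0 ≤ u) (hu1 : u < (C.length : Int)) :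
    ∀ (vs q : List Int) (j : Nat) (P M : List Int),
      pvInv C F P M →
      PySem.List.pyGetD P u 0 ≠ -1 →
      (∀ v ∈ vs, 0 ≤ v ∧ v < (C.length : Int)) →
      (∀ w ∈ q.drop j, 0 ≤ w ∧ w < (C.length : Int) ∧ PySem.List.pyGetD P w 0 ≠ -1) →
      j ≤ q.length →
      ((∃ m P1, spInnerA C F t u vs (q.drop j) P M = Sum.inl (m, P1) ∧
                spInnerB C F t u vs q P = Sum.inl P1 ∧
                m = pvWalk C F P1 P1.length t 10000000000)
       ∨ (∃ q2 P1 M1, spInnerA C F t u vs (q.drop j) P M = Sum.inr (q2.drop j, P1, M1) ∧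
                spInnerB C F t u vs q P = Sum.inr (q2, P1) ∧
                j ≤ q2.length ∧ pvInv C F P1 M1 ∧
                (∀ w ∈ q2.drop j, 0 ≤ w ∧ w < (C.length : Int) ∧ PySem.List.pyGetD P1 w 0 ≠ -1))) := by
  intro vs
  induction vs with
  | nil =>
    intro q j P M hInv hPu _ hq hj
    exact Or.inr ⟨q, P, M, rfl, rfl, hj, hInv, hq⟩
  | cons v vs ih =>
    intro q j P M hInv hPu hvs hq hj
    have hv0 : 0 ≤ v := (hvs v (List.mem_cons_self ..)).1
    have hv1 : v < (C.length : Int) := (hvs v (List.mem_cons_self ..)).2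
    by_cases hc : pvCell C u v - pvCell F u v > 0 ∧ PySem.List.pyGetD P v 0 = -1
    · have hInv' := pv_inv_update C F P M hInv hu0 hu1 hPu hv0 hv1 hc.2
      have hPl : P.length = C.length := hInv.1
      have hPu' : PySem.List.pyGetD (PySem.List.pySetD P v u) u 0 ≠ -1 :=
        pv_good_set P u hv0 (by omega) (by omega) hu0 hPu
      by_cases hvt : v = t
      · subst hvt
        simp only [spInnerA, spInnerB, if_pos hc, if_neg (by simp : ¬ (v ≠ v))]
        refine Or.inl ⟨_, _, rfl, rfl, ?_⟩
        obtain ⟨hPl', hMl', hmain'⟩ := hInv'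
        obtain ⟨k, hk, _, hMle, hwalk⟩ := hmain' v hv0 hv1 (by
          rw [pv_getD_set_self P u hv0 (by omega)]; omega)
        have hlen : (PySem.List.pySetD P v u).length = C.length := hPl'
        rw [hwalk (PySem.List.pySetD P v u).length 10000000000
          (by have := pv_setCount_le (PySem.List.pySetD P v u); omega) (by omega)]
        omega
      · simp only [spInnerA, spInnerB, if_pos hc, if_pos (by exact hvt : v ≠ t), if_neg hvt]
        have hdrop : (q ++ [v]).drop j = q.drop j ++ [v] := List.drop_append_of_le_length hj
        have hgood : ∀ w ∈ (q ++ [v]).drop j, 0 ≤ w ∧ w < (C.length : Int) ∧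
            PySem.List.pyGetD (PySem.List.pySetD P v u) w 0 ≠ -1 := by
          rw [hdrop]
          intro w hw
          rcases List.mem_append.mp hw with hw | hw
          · obtain ⟨h1, h2, h3⟩ := hq w hw
            exact ⟨h1, h2, pv_good_set P u hv0 (by omega) (by omega) h1 h3⟩
          · rw [List.mem_singleton.mp hw]
            exact ⟨hv0, hv1, by rw [pv_getD_set_self P u hv0 (by omega)]; omega⟩
        have := ih (q ++ [v]) j (PySem.List.pySetD P v u) _ hInv' hPu'
          (fun w hw => hvs w (List.mem_cons_of_mem _ hw)) hgood
          (by rw [List.length_append]; omega)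
        rw [hdrop] at this
        exact this
    · simp only [spInnerA, spInnerB, if_neg hc]
      exact ih q j P M hInv hPu (fun w hw => hvs w (List.mem_cons_of_mem _ hw)) hq hj

set_option maxHeartbeats 800000 in
lemma pv_loop_main (C A F : List (List Int)) (t : Int)
    (hA : ∀ u : Int, 0 ≤ u → u < (C.length : Int) →
      ∀ v ∈ PySem.List.pyGetD A u [], 0 ≤ v ∧ v < (C.length : Int)) :
    ∀ (f : Nat) (q : List Int) (i : Nat) (P M : List Int),
      pvInv C F P M →
      (∀ w ∈ q.drop i, 0 ≤ w ∧ w < (C.length : Int) ∧ PySem.List.pyGetD P w 0 ≠ -1) →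
      spLoopA C A F t f (q.drop i) P M =
        (match spLoopB C A F t f q (i : Int) P with
         | (false, P') => ((0 : Int), P')
         | (true, P') => (pvWalk C F P' P'.length t 10000000000, P')) := by
  intro f
  induction f with
  | zero =>
    intro q i P M _ _
    simp [spLoopA, spLoopB]
  | succ f ih =>
    intro q i P M hInv hq
    by_cases hi : i < q.length
    · have hcond : (i : Int) < ((q.length : Nat) : Int) := by exact_mod_cast hi
      have hdrop : q.drop i = q[i] :: q.drop (i + 1) := List.drop_eq_getElem_cons hi
      have hgi : PySem.List.pyGetD q (i : Int) 0 = q[i] := by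
        rw [PySem.List.pyGetD_natCast, List.getD_eq_getElem _ _ hi]
      have hugood := hq q[i] (by rw [hdrop]; exact List.mem_cons_self ..)
      have hinner := pv_inner_main C F t q[i] hugood.1 hugood.2.1
        (PySem.List.pyGetD A q[i] []) q (i + 1) P M hInv hugood.2.2
        (hA q[i] hugood.1 hugood.2.1) (fun w hw => hq w (by rw [hdrop]; exact List.mem_cons_of_mem _ hw))
        (by omega)
      rw [hdrop]
      simp only [spLoopA, spLoopB, if_pos hcond, hgi]
      rcases hinner with ⟨m, P1, ha, hb, hm⟩ | ⟨q2, P1, M1, ha, hb, hj2, hInv1, hgood1⟩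
      · rw [ha, hb, hm]
      · rw [ha, hb]
        have hstep := ih q2 (i + 1) P1 M1 hInv1 hgood1
        rw [show ((i : Int) + 1) = (((i + 1 : Nat)) : Int) by push_cast; ring]
        exact hstep
    · have hcond : ¬ ((i : Int) < ((q.length : Nat) : Int)) := by exact_mod_cast hi
      rw [List.drop_eq_nil_of_le (by omega)]
      simp only [spLoopA, spLoopB, if_neg hcond]

lemma pv_inv_init (C F : List (List Int)) (s : Int)
    (h0 : 0 ≤ s) (h1 : s < (C.length : Int)) :
    pvInv C F (PySem.List.pySetD (List.replicate C.length (-1 : Int)) s (-2))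
      (PySem.List.pySetD (List.replicate C.length (0 : Int)) s 10000000000) := by
  have hPl : (List.replicate C.length (-1 : Int)).length = C.length := List.length_replicate
  have hMl : (List.replicate C.length (0 : Int)).length = C.length := List.length_replicate
  refine ⟨by rw [PySem.List.length_pySetD]; exact hPl, by rw [PySem.List.length_pySetD]; exact hMl, ?_⟩
  intro v hv0 hv1 hv
  have hvs : v = s := by
    by_contra hne
    rw [pv_getD_set_ne _ _ h0 (by omega) hv0 hne,
      PySem.List.pyGetD_eq_getElem _ 0 hv0 (by omega)] at hv
    simp at hv
  subst hvs
  have hPs : PySem.List.pyGetD (PySem.List.pySetD (List.replicate C.length (-1 : Int)) v (-2)) v 0 = -2 :=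
    pv_getD_set_self _ _ hv0 (by omega)
  have hMs : PySem.List.pyGetD (PySem.List.pySetD (List.replicate C.length (0 : Int)) v 10000000000) v 0 = 10000000000 :=
    pv_getD_set_self _ _ hv0 (by omega)
  refine ⟨0, ?_, pvChain.base v hPs, by rw [hMs], ?_⟩
  · exact pv_setCount_pos _ hv0 (by rw [PySem.List.length_pySetD]; omega) (by rw [hPs]; omega)
  · intro f acc hf hacc
    cases f with
    | zero => omega
    | succ f =>
      have hred : pvWalk C F (PySem.List.pySetD (List.replicate C.length (-1 : Int)) v (-2)) (f + 1) v acc = acc := by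
        simp [pvWalk, hPs]
      rw [hred, hMs]
      omega


lemma pv_setD_norm (xs : List Int) (i : Int) (x : Int)
    (h0 : -(xs.length : Int) ≤ i) (h1 : i < (xs.length : Int)) :
    PySem.List.pySetD xs i x =
      xs.set (if 0 ≤ i then i.toNat else (i + xs.length).toNat) x := by
  by_cases hi : 0 ≤ i
  · rw [if_pos hi]; exact PySem.List.pySetD_of_nonneg xs x hi
  · rw [if_neg hi]
    simp only [PySem.List.pySetD, PySem.List.pySet?, PySem.List.pyIdx?]
    rw [if_neg (by omega), if_pos (by omega)]
    simp only [Option.map_some, Option.getD_some]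
    congr 1
    omega

lemma pv_getD_norm (xs : List Int) (i : Int) (d : Int)
    (h0 : -(xs.length : Int) ≤ i) (h1 : i < (xs.length : Int)) :
    PySem.List.pyGetD xs i d =
      xs.getD (if 0 ≤ i then i.toNat else (i + xs.length).toNat) d := by
  by_cases hi : 0 ≤ i
  · rw [if_pos hi, PySem.List.pyGetD_eq_getElem xs d hi h1,
      List.getD_eq_getElem xs d (by omega)]
  · rw [if_neg hi]
    have hk : i = -((((-i).toNat : Nat)) : Int) := by omega
    rw [hk, PySem.List.pyGetD_neg_natCast xs (-i).toNat d (by omega) (by omega),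
      List.getD_eq_getElem xs d (by omega)]
    congr 1
    omega

lemma pv_trivial_innerA (C F : List (List Int)) (t u : Int) :
    ∀ (vs q P M : List Int),
      (∀ v ∈ vs, ¬ (pvCell C u v - pvCell F u v > 0 ∧ PySem.List.pyGetD P v 0 = -1)) →
      spInnerA C F t u vs q P M = Sum.inr (q, P, M) := by
  intro vs
  induction vs with
  | nil => intro q P M _; rfl
  | cons v vs ih =>
    intro q P M h
    simp only [spInnerA, if_neg (h v (List.mem_cons_self ..))]
    exact ih q P M (fun w hw => h w (List.mem_cons_of_mem _ hw))

lemma pv_trivial_innerB (C F : List (List Int)) (t u : Int) :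
    ∀ (vs q P : List Int),
      (∀ v ∈ vs, ¬ (pvCell C u v - pvCell F u v > 0 ∧ PySem.List.pyGetD P v 0 = -1)) →
      spInnerB C F t u vs q P = Sum.inr (q, P) := by
  intro vs
  induction vs with
  | nil => intro q P _; rfl
  | cons v vs ih =>
    intro q P h
    simp only [spInnerB, if_neg (h v (List.mem_cons_self ..))]
    exact ih q P (fun w hw => h w (List.mem_cons_of_mem _ hw))

-- ===== VERDICT (by name: the statement is the Claim_ definition above) =====
theorem shortestAugmentingPath_spec : Claim_equal_shortestAugmentingPath := by
  intro C A F s t _hDom hPre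
  unfold Spec_shortestAugmentingPath
  show shortestAugmentingPath C A F s t = shortestAugmentingPath_alt C A F s t
  rcases hPre with ⟨hs0, hs1, hAl, _hFl, _hCr, _hFr, hAdj⟩ | ⟨hs0, hs1, hsa0, hsa1, hrow⟩
  · -- square case: BFS invariant proof
    have hA : ∀ u : Int, 0 ≤ u → u < (C.length : Int) →
        ∀ v ∈ PySem.List.pyGetD A u [], 0 ≤ v ∧ v < (C.length : Int) := by
      intro u hu0 hu1 v hv
      rw [PySem.List.pyGetD_eq_getElem A [] hu0 (by omega)] at hv
      exact hAdj A[u.toNat] (List.getElem_mem _) v hv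
    have hInit := pv_inv_init C F s hs0 hs1
    have hq : ∀ w ∈ ([s] : List Int).drop 0, 0 ≤ w ∧ w < (C.length : Int) ∧
        PySem.List.pyGetD (PySem.List.pySetD (List.replicate C.length (-1 : Int)) s (-2)) w 0 ≠ -1 := by
      intro w hw
      rw [List.drop_zero] at hw
      rw [List.mem_singleton.mp hw]
      exact ⟨hs0, hs1, by
        rw [pv_getD_set_self _ _ hs0 (by rw [List.length_replicate]; omega)]; omega⟩
    have := pv_loop_main C A F t hA C.length [s] 0
      (PySem.List.pySetD (List.replicate C.length (-1 : Int)) s (-2))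
      (PySem.List.pySetD (List.replicate C.length (0 : Int)) s 10000000000)
      hInit hq
    rw [List.drop_zero] at this
    rw [show ((0 : Nat) : Int) = 0 from rfl] at this
    simp only [shortestAugmentingPath, shortestAugmentingPath_alt]
    exact this
  · -- trivial-scan case: the BFS never writes P, both sides return (0, P0)
    have hn : 1 ≤ C.length := by omega
    obtain ⟨f, hf⟩ : ∃ f, C.length = f + 1 := ⟨C.length - 1, by omega⟩
    have hnowrite : ∀ v ∈ PySem.List.pyGetD A s [],
        ¬ (pvCell C s v - pvCell F s v > 0 ∧
           PySem.List.pyGetD (PySem.List.pySetD (List.replicate C.length (-1 : Int)) s (-2)) v 0 = -1) := by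
      rintro v hv ⟨hres, hPv⟩
      obtain ⟨_, _, _, hre⟩ := hrow v hv
      obtain ⟨hv0, hv1, hrel⟩ := hre (by simpa [pvCell] using hres)
      have hPv2 : PySem.List.pyGetD (PySem.List.pySetD (List.replicate C.length (-1 : Int)) s (-2)) v 0 = -2 := by
        rw [pv_setD_norm _ _ _ (by rw [List.length_replicate]; omega)
          (by rw [List.length_replicate]; omega)]
        rw [pv_getD_norm _ _ _ (by rw [List.length_set, List.length_replicate]; omega)
          (by rw [List.length_set, List.length_replicate]; omega)]
        rw [show (if 0 ≤ v then v.toNat else (v + ((List.replicate C.length (-1 : Int)).set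
            (if 0 ≤ s then s.toNat else (s + (List.replicate C.length (-1 : Int)).length).toNat) (-2)).length).toNat)
          = (if 0 ≤ s then s.toNat else (s + (List.replicate C.length (-1 : Int)).length).toNat) by
            rw [List.length_set, List.length_replicate]; split_ifs <;> omega]
        rw [List.getD_eq_getElem _ _ (by rw [List.length_set, List.length_replicate]; split_ifs <;> omega)]
        simp
      omega
    have hA1 : spInnerA C F t s (PySem.List.pyGetD A s []) []
        (PySem.List.pySetD (List.replicate C.length (-1 : Int)) s (-2))
        (PySem.List.pySetD (List.replicate C.length (0 : Int)) s 10000000000) =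
        Sum.inr ([], PySem.List.pySetD (List.replicate C.length (-1 : Int)) s (-2),
          PySem.List.pySetD (List.replicate C.length (0 : Int)) s 10000000000) :=
      pv_trivial_innerA C F t s _ _ _ _ hnowrite
    have hB1 : spInnerB C F t s (PySem.List.pyGetD A s []) [s]
        (PySem.List.pySetD (List.replicate C.length (-1 : Int)) s (-2)) =
        Sum.inr ([s], PySem.List.pySetD (List.replicate C.length (-1 : Int)) s (-2)) :=
      pv_trivial_innerB C F t s _ _ _ hnowrite
    rw [hf] at hA1 hB1
    simp only [shortestAugmentingPath, shortestAugmentingPath_alt]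
    rw [hf]
    simp only [spLoopA, spLoopB]
    rw [if_pos (show (0 : Int) < (([s] : List Int).length : Int) by simp),
      PySem.List.pyGetD_zero_cons, hA1, hB1]
    cases f with
    | zero => rfl
    | succ f' =>
      simp only [spLoopA, spLoopB]
      rw [if_neg (show ¬ ((0 : Int) + 1 < (([s] : List Int).length : Int)) by simp)]
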